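-- pv_equiv track=rewrite | github.com/sayouzone/sayou-fabric | packages-dev/sayou-stock/src/sayou/stock/edgar/parsers/form_10k.py | _parse_risk_factors
-- ===== SOURCE A (Python) =====
-- def _parse_risk_factors(risk_section: str) -> list[str]:
--     """Risk Factors 섹션에서 개별 리스크 추출"""
--     risks = []
--     lines = risk_section.split("\n")
--     current_risk = []
--
--     for line in lines:
--         line = line.strip()
--         if not line:
--             continue
--
--         # 새로운 리스크 항목 시작 감지
--         is_new_risk = (
--             (line.isupper() and len(line) > 20) or
--             (line.endswith(".") and len(line) < 200 and line[0].isupper())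
--         )
--
--         if is_new_risk:
--             if current_risk:
--                 risks.append(" ".join(current_risk))
--             current_risk = [line]
--         else:
--             current_risk.append(line)
--
--     if current_risk:
--         risks.append(" ".join(current_risk))
--
--     return risks[:20]
-- ===== SOURCE B (Python) =====
-- def _is_new_risk(line: str) -> bool:
--     return (line.isupper() and len(line) > 20) or (
--         line.endswith(".") and len(line) < 200 and line[0].isupper()
--     )
--
--
-- def _parse_risk_factors(risk_section: str) -> list[str]:
--     """Risk Factors 섹션에서 개별 리스크 추출"""
--     filtered = [t for l in risk_section.split("\n") if (t := l.strip())]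
--     groups = []
--     while filtered:
--         rest = filtered[1:]
--         k = 0
--         while k < len(rest) and not _is_new_risk(rest[k]):
--             k += 1
--         groups.append(" ".join([filtered[0]] + rest[:k]))
--         filtered = rest[k:]
--     return groups[:20]
-- ===== Notes on version B (the rewrite author's own statement) =====
-- stated objective: alternative
-- what changed: A's single pass with mutable accumulator state (current group, flush-on-new-item, trailing flush) is replaced by a filter pass producing the non-empty stripped lines followed by span-scanning group extraction that peels one group (leader plus following non-new-risk lines) off the filtered list at a time, with no accumulator or trailing-flush logic.
import Mathlib
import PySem

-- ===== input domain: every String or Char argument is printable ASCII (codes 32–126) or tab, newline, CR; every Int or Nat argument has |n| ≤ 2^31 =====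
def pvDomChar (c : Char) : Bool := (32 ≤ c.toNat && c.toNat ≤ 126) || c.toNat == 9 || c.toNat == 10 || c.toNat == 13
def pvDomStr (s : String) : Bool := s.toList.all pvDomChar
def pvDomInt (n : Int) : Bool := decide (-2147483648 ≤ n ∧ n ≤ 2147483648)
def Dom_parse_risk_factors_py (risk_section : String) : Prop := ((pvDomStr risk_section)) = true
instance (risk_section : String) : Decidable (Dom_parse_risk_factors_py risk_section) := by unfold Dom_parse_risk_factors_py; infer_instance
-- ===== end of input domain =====

-- B replaces A's stateful accumulator-and-flush loop by a filter pass followed by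
-- span-scanning group extraction (objective: simpler decomposition, same cost).

-- str.isupper() at STRING level (PySem has only the char form); ported by hand:
-- true iff the string has a cased character and no lowercase one — exact on the
-- ASCII domain, where the cased characters are exactly the alphabetic ones.
def pyStrIsupper (s : String) : Bool :=
  s.toList.any PySem.Str.isalpha && s.toList.all (fun c => !PySem.Str.islower c)

-- ===== PORT A =====
-- the body of A's 'for line in lines' loop, acting on the state (risks, current_risk)
def stepA (acc : List String × List String) (line : String) : List String × List String :=
  let line := PySem.Str.strip line
  if line = "" then acc        -- 'if not line: continue'
  else
    let is_new_risk :=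
      (pyStrIsupper line && PySem.Str.len line > 20) ||
      (PySem.Str.endswith line "." && PySem.Str.len line < 200 &&
        -- line[0].isupper(): line ≠ "" here, so pyGet? is some; none would be IndexError
        (PySem.Str.pyGet? line 0).elim false PySem.Str.isupper)
    if is_new_risk then
      if acc.2 = [] then (acc.1, [line])
      else (acc.1 ++ [PySem.Str.join " " acc.2], [line])
    else (acc.1, acc.2 ++ [line])

def parse_risk_factors_py (risk_section : String) : List String :=
  let lines := (PySem.Str.split? risk_section "\n").getD []   -- sep "\n" ≠ "", so split? = some
  let st := lines.foldl stepA ([], [])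
  let risks := if st.2 = [] then st.1 else st.1 ++ [PySem.Str.join " " st.2]
  PySem.List.slice risks none (some 20)                       -- risks[:20]

-- ===== PORT B =====
def isNewRisk (line : String) : Bool :=
  (pyStrIsupper line && PySem.Str.len line > 20) ||
  (PySem.Str.endswith line "." && PySem.Str.len line < 200 &&
    (PySem.Str.pyGet? line 0).elim false PySem.Str.isupper)

-- the filtering comprehension: stripped lines, empties dropped
def filtLines (ls : List String) : List String :=
  ls.filterMap (fun l => let t := PySem.Str.strip l; if t = "" then none else some t)

-- inner while loop of Source B: k = number of leading non-new-risk lines of rest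
def scanLen : List String → Nat
  | [] => 0
  | x :: xs => if isNewRisk x then 0 else scanLen xs + 1

-- outer while loop of Source B: peel off one group 'filtered[0] :: rest[:k]' at a time
def groupsB : List String → List String
  | [] => []
  | x :: rest =>
      PySem.Str.join " " (x :: rest.take (scanLen rest)) :: groupsB (rest.drop (scanLen rest))
  termination_by l => l.length
  decreasing_by simp [List.length_drop]

def parse_risk_factors_py_alt (risk_section : String) : List String :=
  let lines := (PySem.Str.split? risk_section "\n").getD []
  let filtered := filtLines lines
  PySem.List.slice (groupsB filtered) none (some 20)          -- groups[:20]

-- ===== PRECONDITION & SPEC =====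
def Spec_parse_risk_factors_py (risk_section : String) (out : List String) : Prop := out = parse_risk_factors_py_alt risk_section
instance (risk_section : String) (out : List String) : Decidable (Spec_parse_risk_factors_py risk_section out) := by unfold Spec_parse_risk_factors_py; infer_instance

-- ===== CLAIM (what is proved, stated in full; the proofs are below) =====
def Claim_equal_parse_risk_factors_py : Prop := ∀ (risk_section : String), Dom_parse_risk_factors_py risk_section → Spec_parse_risk_factors_py risk_section (parse_risk_factors_py risk_section)

-- ===== LEMMAS AND PROOFS =====

-- A's loop body on a line already stripped and nonempty
def stepA' (acc : List String × List String) (line : String) : List String × List String :=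
  if isNewRisk line then
    if acc.2 = [] then (acc.1, [line])
    else (acc.1 ++ [PySem.Str.join " " acc.2], [line])
  else (acc.1, acc.2 ++ [line])

-- A's trailing flush
def finalizeA (st : List String × List String) : List String :=
  if st.2 = [] then st.1 else st.1 ++ [PySem.Str.join " " st.2]

-- A's grouping recursion with pending group c, extracted from the loop
def chunksA (c : List String) : List String → List String
  | [] => if c = [] then [] else [PySem.Str.join " " c]
  | x :: xs =>
      if isNewRisk x then
        (if c = [] then [] else [PySem.Str.join " " c]) ++ chunksA [x] xs
      else chunksA (c ++ [x]) xs

theorem foldl_stepA_filt (ls : List String) (acc : List String × List String) :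
    ls.foldl stepA acc = (filtLines ls).foldl stepA' acc := by
  induction ls generalizing acc with
  | nil => rfl
  | cons l ls ih =>
      simp only [List.foldl_cons, filtLines, List.filterMap_cons, stepA]
      by_cases h : PySem.Str.strip l = ""
      · simp only [h, reduceIte]
        exact ih acc
      · simp only [if_neg h, List.foldl_cons]
        have : filtLines ls = List.filterMap (fun l => let t := PySem.Str.strip l; if t = "" then none else some t) ls := rfl
        rw [← this, ih]
        rfl

theorem finalize_foldl_stepA' (f : List String) (r c : List String) :
    finalizeA (f.foldl stepA' (r, c)) = r ++ chunksA c f := by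
  induction f generalizing r c with
  | nil =>
      simp only [List.foldl_nil, finalizeA, chunksA]
      by_cases h : c = [] <;> simp [h]
  | cons x xs ih =>
      simp only [List.foldl_cons, stepA', chunksA]
      by_cases hn : isNewRisk x
      · simp only [hn, if_pos]
        by_cases hc : c = []
        · simp only [hc, reduceIte, ih]; simp
        · simp only [if_neg hc, ih, List.append_assoc]
      · simp only [hn, Bool.false_eq_true, reduceIte, ih]

theorem groupsB_nil : groupsB [] = [] := by rw [groupsB]

theorem groupsB_cons (x : String) (rest : List String) :
    groupsB (x :: rest) =
      PySem.Str.join " " (x :: rest.take (scanLen rest)) :: groupsB (rest.drop (scanLen rest)) := by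
  rw [groupsB]

theorem chunksA_ne (f : List String) : ∀ (c : List String), c ≠ [] →
    chunksA c f = PySem.Str.join " " (c ++ f.take (scanLen f)) :: groupsB (f.drop (scanLen f)) := by
  induction f with
  | nil => intro c hc; simp [chunksA, hc, groupsB_nil]
  | cons x xs ih =>
      intro c hc
      by_cases hn : isNewRisk x
      · simp only [chunksA, hn, reduceIte, if_neg hc]
        rw [ih [x] (by simp)]
        simp [hn, scanLen, groupsB_cons]
      · simp only [chunksA, hn, Bool.false_eq_true, reduceIte]
        rw [ih (c ++ [x]) (by simp)]
        simp [scanLen, hn]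

theorem chunksA_nil_eq_groupsB (f : List String) : chunksA [] f = groupsB f := by
  cases f with
  | nil => simp [chunksA, groupsB_nil]
  | cons x xs =>
      have hx : chunksA [] (x :: xs) = chunksA [x] xs := by
        simp only [chunksA]
        by_cases hn : isNewRisk x <;> simp [hn]
      rw [hx, chunksA_ne xs [x] (by simp), groupsB_cons]
      simp

theorem main_eq (ls : List String) :
    (if (ls.foldl stepA ([], [])).2 = [] then (ls.foldl stepA ([], [])).1
     else (ls.foldl stepA ([], [])).1 ++ [PySem.Str.join " " (ls.foldl stepA ([], [])).2])
    = groupsB (filtLines ls) := by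
  rw [foldl_stepA_filt]
  have h := finalize_foldl_stepA' (filtLines ls) [] []
  simp only [finalizeA] at h
  rw [h, List.nil_append, chunksA_nil_eq_groupsB]

-- ===== VERDICT (by name: the statement is the Claim_ definition above) =====
theorem parse_risk_factors_py_spec : Claim_equal_parse_risk_factors_py := by
  intro s _
  show parse_risk_factors_py s = parse_risk_factors_py_alt s
  simp only [parse_risk_factors_py, parse_risk_factors_py_alt, main_eq]
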